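-- pv_equiv track=rewrite | github.com/tchebagual71/solana-wallet-tracker | source/bot_tools.py | is_solana_wallet_address
-- ===== SOURCE A (Python) =====
-- def is_solana_wallet_address(address):
--     # Check if this address looks like a solana wallet
--     base58_chars = '123456789ABCDEFGHJKLMNPQRSTUVWXYZabcdefghijkmnopqrstuvwxyz'
--     address_length = [32, 44]
--     if len(address) < address_length[0]:
--         return False
--
--     if len(address) > address_length[1]:
--         return False
--
--     for char in address:
--         if char not in base58_chars:
--             return False
--
--     return True
-- ===== SOURCE B (Python) =====
-- import re
--
-- _SOLANA_ADDR_RE = re.compile(r'[1-9A-HJ-NP-Za-km-z]{32,44}')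
--
-- def is_solana_wallet_address(address):
--     return bool(_SOLANA_ADDR_RE.fullmatch(address))
-- ===== Notes on version B (the rewrite author's own statement) =====
-- stated objective: idiomatic
-- what changed: Replaced the explicit length checks and per-character membership loop with a single anchored regular-expression fullmatch against [1-9A-HJ-NP-Za-km-z]{32,44}.
import Mathlib
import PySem

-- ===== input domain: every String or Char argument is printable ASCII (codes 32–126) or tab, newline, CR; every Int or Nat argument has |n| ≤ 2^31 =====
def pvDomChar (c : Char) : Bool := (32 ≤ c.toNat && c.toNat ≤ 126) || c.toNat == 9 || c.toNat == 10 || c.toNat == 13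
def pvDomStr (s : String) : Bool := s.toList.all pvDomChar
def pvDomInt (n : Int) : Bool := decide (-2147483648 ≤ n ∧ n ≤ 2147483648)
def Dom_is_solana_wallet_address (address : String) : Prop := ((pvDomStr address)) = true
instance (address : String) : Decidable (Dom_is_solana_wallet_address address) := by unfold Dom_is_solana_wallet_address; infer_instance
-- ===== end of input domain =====

-- B replaces A's explicit length checks and character loop by one anchored
-- regex-style fullmatch ([1-9A-HJ-NP-Za-km-z]{32,44}); objective: idiomatic.

-- ===== PORT A =====
-- the base58 alphabet string of A, as its character list
def pvBase58Chars : List Char :=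
  "123456789ABCDEFGHJKLMNPQRSTUVWXYZabcdefghijkmnopqrstuvwxyz".toList

-- A's for-loop: returns False on the first char not in the alphabet, True at the end
def pvALoop : List Char → Bool
  | [] => true
  | c :: cs => if c ∈ pvBase58Chars then pvALoop cs else false

def is_solana_wallet_address (address : String) : Bool :=
  if address.toList.length < 32 then false
  else if address.toList.length > 44 then false
  else pvALoop address.toList

-- ===== PORT B =====
-- the regex character class [1-9A-HJ-NP-Za-km-z]
def pvB58Class (c : Char) : Bool :=
  ('1' ≤ c && c ≤ '9') || ('A' ≤ c && c ≤ 'H') || ('J' ≤ c && c ≤ 'N') ||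
  ('P' ≤ c && c ≤ 'Z') || ('a' ≤ c && c ≤ 'k') || ('m' ≤ c && c ≤ 'z')

-- fullmatch of [class]{32,44}: every char in the class and anchored length 32..44
def is_solana_wallet_address_alt (address : String) : Bool :=
  32 ≤ address.toList.length && address.toList.length ≤ 44 &&
    address.toList.all pvB58Class

-- ===== PRECONDITION & SPEC =====
def Spec_is_solana_wallet_address (address : String) (out : Bool) : Prop := out = is_solana_wallet_address_alt address
instance (address : String) (out : Bool) : Decidable (Spec_is_solana_wallet_address address out) := by unfold Spec_is_solana_wallet_address; infer_instance

-- ===== CLAIM (what is proved, stated in full; the proofs are below) =====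
def Claim_equal_is_solana_wallet_address : Prop := ∀ (address : String), Dom_is_solana_wallet_address address → Spec_is_solana_wallet_address address (is_solana_wallet_address address)

-- ===== LEMMAS AND PROOFS =====

-- membership in A's alphabet coincides with B's regex character class
theorem pv_mem_iff_class (c : Char) : (c ∈ pvBase58Chars) ↔ pvB58Class c = true := by
  simp [pvBase58Chars, pvB58Class, Char.ext_iff, UInt32.ext_iff,
    Char.le_def, UInt32.le_iff_toNat_le]
  omega

-- A's loop is B's all-check
theorem pv_aLoop_eq_all (l : List Char) : pvALoop l = l.all pvB58Class := by
  induction l with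
  | nil => rfl
  | cons c cs ih =>
    by_cases h : c ∈ pvBase58Chars
    · simp [pvALoop, h, List.all_cons, (pv_mem_iff_class c).1 h, ih]
    · have hc : pvB58Class c = false := by
        cases hb : pvB58Class c
        · rfl
        · exact absurd ((pv_mem_iff_class c).2 hb) h
      simp [pvALoop, h, List.all_cons, hc]

-- ===== VERDICT (by name: the statement is the Claim_ definition above) =====
theorem is_solana_wallet_address_spec : Claim_equal_is_solana_wallet_address := by
  intro address _
  unfold Spec_is_solana_wallet_address is_solana_wallet_address is_solana_wallet_address_alt
  rw [pv_aLoop_eq_all]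
  split_ifs with h1 h2 <;>
    simp_all [Bool.and_assoc]
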